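-- pv_equiv track=rewrite | github.com/H-Maktub/leetcode | leetcode/100375.py | losingPlayer
-- ===== SOURCE A (Python) =====
-- def losingPlayer(x: int, y: int) -> str:
--     ret = "Bob"
--     while x > 0 and y > 3:
--         x-=1
--         y-=4
--         if ret == "Bob":
--             ret = "Alice"
--         else:
--             ret = "Bob"
--     return ret
-- ===== SOURCE B (Python) =====
-- def losingPlayer(x: int, y: int) -> str:
--     turns = max(0, min(x, y // 4))
--     return "Alice" if turns % 2 == 1 else "Bob"
-- ===== Notes on version B (the rewrite author's own statement) =====
-- stated objective: faster
-- what changed: Replaces the turn-by-turn simulation loop with a closed form: the number of turns is min(x, y//4) (clamped at 0) and the winner is decided by its parity.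
import Mathlib
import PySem

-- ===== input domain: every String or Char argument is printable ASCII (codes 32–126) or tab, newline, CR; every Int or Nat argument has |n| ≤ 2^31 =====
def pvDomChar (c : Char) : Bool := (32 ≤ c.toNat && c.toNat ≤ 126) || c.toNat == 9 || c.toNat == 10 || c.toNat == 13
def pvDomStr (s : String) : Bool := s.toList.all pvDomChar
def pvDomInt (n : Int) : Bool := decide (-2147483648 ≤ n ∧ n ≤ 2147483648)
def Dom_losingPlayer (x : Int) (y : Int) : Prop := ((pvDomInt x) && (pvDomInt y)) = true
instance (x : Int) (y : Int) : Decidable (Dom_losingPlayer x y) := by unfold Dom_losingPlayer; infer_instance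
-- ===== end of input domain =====

-- B replaces A's turn-by-turn simulation with the closed form: turns = max 0 (min x (y//4)), winner by parity (O(1)).

-- ===== PORT A =====
-- the while loop of A, step for step; terminates because x strictly decreases while x > 0
def losingPlayerLoop (x : Int) (y : Int) (ret : String) : String :=
  if h : x > 0 ∧ y > 3 then
    losingPlayerLoop (x - 1) (y - 4) (if ret = "Bob" then "Alice" else "Bob")
  else ret
termination_by x.toNat
decreasing_by omega

def losingPlayer (x : Int) (y : Int) : String :=
  losingPlayerLoop x y "Bob"

-- ===== PORT B =====
def losingPlayer_alt (x : Int) (y : Int) : String :=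
  let turns := max 0 (min x (PySem.Int.floordiv y 4))
  if PySem.Int.mod turns 2 = 1 then "Alice" else "Bob"

-- ===== PRECONDITION & SPEC =====
def Spec_losingPlayer (x : Int) (y : Int) (out : String) : Prop := out = losingPlayer_alt x y
instance (x : Int) (y : Int) (out : String) : Decidable (Spec_losingPlayer x y out) := by unfold Spec_losingPlayer; infer_instance

-- ===== CLAIM (what is proved, stated in full; the proofs are below) =====
def Claim_equal_losingPlayer : Prop := ∀ (x : Int) (y : Int), Dom_losingPlayer x y → Spec_losingPlayer x y (losingPlayer x y)

-- ===== LEMMAS AND PROOFS =====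

-- flip applied n times, matching the loop's alternation
def pvFlipN (n : Nat) (ret : String) : String :=
  match n with
  | 0 => ret
  | n + 1 => pvFlipN n (if ret = "Bob" then "Alice" else "Bob")

lemma pvFlipN_bob (n : Nat) :
    pvFlipN n "Bob" = (if n % 2 = 1 then "Alice" else "Bob") ∧
    pvFlipN n "Alice" = (if n % 2 = 1 then "Bob" else "Alice") := by
  induction n with
  | zero => simp [pvFlipN]
  | succ n ih =>
    have h2 : (n + 1) % 2 = 1 ↔ ¬ n % 2 = 1 := by omega
    constructor <;> simp only [pvFlipN] <;> norm_num <;>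
      rcases Nat.mod_two_eq_zero_or_one n with h | h <;>
      simp [h2, h, ih.1, ih.2]

lemma floordiv4_sub (y : Int) : PySem.Int.floordiv (y - 4) 4 = PySem.Int.floordiv y 4 - 1 := by
  have h1 := PySem.Int.floordiv_eq_ediv_of_pos (a := y - 4) (b := 4) (by omega)
  have h2 := PySem.Int.floordiv_eq_ediv_of_pos (a := y) (b := 4) (by omega)
  rw [h1, h2]
  omega

lemma floordiv4_ge_one {y : Int} (h : y > 3) : PySem.Int.floordiv y 4 ≥ 1 := by
  rw [PySem.Int.floordiv_eq_ediv_of_pos (by omega)]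
  omega

lemma loop_eq_flipN (x y : Int) (ret : String) :
    losingPlayerLoop x y ret = pvFlipN (max 0 (min x (PySem.Int.floordiv y 4))).toNat ret := by
  by_cases h : x > 0 ∧ y > 3
  · rw [losingPlayerLoop, dif_pos h, loop_eq_flipN (x - 1) (y - 4)]
    have hd := floordiv4_ge_one h.2
    have hfd := floordiv4_sub y
    have ht : (max 0 (min x (PySem.Int.floordiv y 4))).toNat
        = (max 0 (min (x - 1) (PySem.Int.floordiv (y - 4) 4))).toNat + 1 := by
      omega
    rw [ht, pvFlipN]
  · rw [losingPlayerLoop]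
    simp only [h, dite_false]
    have ht : (max 0 (min x (PySem.Int.floordiv y 4))).toNat = 0 := by
      rcases not_and_or.mp h with hx | hy
      · omega
      · have : PySem.Int.floordiv y 4 ≤ 0 := by
          rw [PySem.Int.floordiv_eq_ediv_of_pos (by omega)]
          omega
        omega
    rw [ht]; rfl
termination_by x.toNat
decreasing_by omega

-- ===== VERDICT (by name: the statement is the Claim_ definition above) =====
theorem losingPlayer_spec : Claim_equal_losingPlayer := by
  intro x y _
  unfold Spec_losingPlayer losingPlayer losingPlayer_alt
  rw [loop_eq_flipN, (pvFlipN_bob _).1]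
  set t : Int := max 0 (min x (PySem.Int.floordiv y 4)) with hts
  have ht : 0 ≤ t := le_max_left _ _
  have hm : PySem.Int.mod t 2 = (t.toNat % 2 : Nat) := by
    rw [PySem.Int.mod_eq_emod_of_pos (by omega)]
    omega
  simp only [hm]
  by_cases h : t.toNat % 2 = 1 <;> simp [h] <;> omega
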